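-- pv_equiv track=rewrite | github.com/AlexAlifimoff/cs224d-project | util.py | remove_escaped
-- ===== SOURCE A (Python) =====
-- def remove_escaped(s):
--     rep = {
--         "\\n": " ",
--         "\\'": "'",
--         '\\"': '"'
--         }
--     for k, v in rep.items():
--         s = s.replace(k, v)
--     return s.strip()
-- ===== SOURCE B (Python) =====
-- def remove_escaped(s):
--     out = []
--     i = 0
--     n = len(s)
--     while i < n:
--         c = s[i]
--         if c == '\\' and i + 1 < n and s[i + 1] in "n'\"":
--             out.append(' ' if s[i + 1] == 'n' else s[i + 1])
--             i += 2
--         else: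
--             out.append(c)
--             i += 1
--     return ''.join(out).strip()
-- ===== Notes on version B (the rewrite author's own statement) =====
-- stated objective: idiomatic
-- what changed: B replaces the three sequential str.replace passes (each rescanning the whole string) by a single left-to-right scan that dispatches on the character after each backslash, then strips.
import Mathlib
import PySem

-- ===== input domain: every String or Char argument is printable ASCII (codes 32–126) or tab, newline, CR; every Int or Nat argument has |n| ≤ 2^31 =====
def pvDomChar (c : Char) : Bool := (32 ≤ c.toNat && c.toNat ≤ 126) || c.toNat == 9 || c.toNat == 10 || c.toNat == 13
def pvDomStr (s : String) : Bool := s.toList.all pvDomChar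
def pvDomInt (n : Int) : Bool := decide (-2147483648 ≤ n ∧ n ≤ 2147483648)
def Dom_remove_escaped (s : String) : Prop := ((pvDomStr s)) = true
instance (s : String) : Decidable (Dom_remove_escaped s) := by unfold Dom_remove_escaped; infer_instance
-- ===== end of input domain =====

-- B collapses A's three sequential str.replace passes into one left-to-right scan (then strips); same return value, proved for all strings.

-- ===== PORT A =====
def remove_escaped (s : String) : String :=
  PySem.Str.strip
    ([("\\n", " "), ("\\'", "'"), ("\\\"", "\"")].foldl
      (fun acc kv => PySem.Str.replace acc kv.1 kv.2) s)

-- ===== PORT B =====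
-- the while loop of Source B: one pass, consuming two characters on an escape sequence
def goB : List Char → List Char
  | [] => []
  | [c] => [c]
  | c :: d :: t =>
    if c = '\\' ∧ (d = 'n' ∨ d = '\'' ∨ d = '"') then
      (if d = 'n' then ' ' else d) :: goB t
    else
      c :: goB (d :: t)

def remove_escaped_alt (s : String) : String :=
  PySem.Str.strip (String.ofList (goB s.toList))

-- ===== PRECONDITION & SPEC =====
def Spec_remove_escaped (s : String) (out : String) : Prop := out = remove_escaped_alt s
instance (s : String) (out : String) : Decidable (Spec_remove_escaped s out) := by unfold Spec_remove_escaped; infer_instance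

-- ===== CLAIM (what is proved, stated in full; the proofs are below) =====
def Claim_equal_remove_escaped : Prop := ∀ (s : String), Dom_remove_escaped s → Spec_remove_escaped s (remove_escaped s)

-- ===== LEMMAS AND PROOFS =====

-- one str.replace pass with a two-character pattern, written as the natural recursion
def rep2 (a b : Char) (new : List Char) : List Char → List Char
  | [] => []
  | [c] => [c]
  | c :: d :: t => if c = a ∧ d = b then new ++ rep2 a b new t else c :: rep2 a b new (d :: t)

theorem go_eq_rep2 (a b : Char) (new : List Char) :
    ∀ (fuel : Nat) (l acc : List Char), l.length ≤ fuel →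
      PySem.Chars.replace.go [a, b] new fuel l acc = acc.reverse ++ rep2 a b new l := by
  intro fuel
  induction fuel with
  | zero =>
    intro l acc h
    have : l = [] := List.eq_nil_of_length_eq_zero (Nat.le_zero.mp h)
    subst this
    rw [PySem.Chars.replace.go.eq_def]
    simp [rep2]
  | succ n ih =>
    intro l acc h
    match l with
    | [] => rw [PySem.Chars.replace.go.eq_def]; simp [rep2]
    | [c] =>
      rw [PySem.Chars.replace.go.eq_def]
      simp only [List.isPrefixOf, Bool.and_eq_true, beq_iff_eq, Bool.false_eq_true]
      rw [ih [] (c :: acc) (by simp)]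
      simp [rep2]
    | c :: d :: t =>
      rw [PySem.Chars.replace.go.eq_def]
      by_cases hab : c = a ∧ d = b
      · have hpre : [a, b].isPrefixOf (c :: d :: t) = true := by
          simp [List.isPrefixOf, hab.1, hab.2]
        simp only [hpre, if_true]
        have hlen : (List.drop [a, b].length (c :: d :: t)).length ≤ n := by
          simp at h ⊢; omega
        rw [ih _ _ hlen]
        simp [rep2, hab.1, hab.2]
      · have hpre : [a, b].isPrefixOf (c :: d :: t) = false := by
          simp [List.isPrefixOf]
          intro h' hb
          exact hab ⟨h'.symm, hb.symm⟩
        simp only [hpre, Bool.false_eq_true, if_false]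
        rw [ih (d :: t) (c :: acc) (by simp at h ⊢; omega)]
        simp [rep2, hab]

theorem replace_eq_rep2 (a b : Char) (new l : List Char) :
    PySem.Chars.replace l [a, b] new = rep2 a b new l := by
  rw [PySem.Chars.replace]
  simp only [List.isEmpty_cons, Bool.false_eq_true, if_false]
  rw [go_eq_rep2 a b new l.length l [] le_rfl]
  simp

theorem rep2_cons_ne_fst (a b : Char) (new : List Char) (c : Char) (x : List Char)
    (hc : c ≠ a) : rep2 a b new (c :: x) = c :: rep2 a b new x := by
  match x with
  | [] => simp [rep2]
  | d :: t => simp [rep2, hc]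

theorem rep2_cons_ne_snd (a b : Char) (new : List Char) (c : Char) (x : List Char)
    (hx : x.head? ≠ some b) : rep2 a b new (c :: x) = c :: rep2 a b new x := by
  match x with
  | [] => simp [rep2]
  | d :: t =>
    have hd : d ≠ b := by simpa using hx
    simp [rep2, hd]

theorem rep2_head? (a b : Char) (new : List Char) (l : List Char) (w : Char)
    (hnew : new.head? = some w) :
    (rep2 a b new l).head? = l.head? ∨ (rep2 a b new l).head? = some w := by
  match l with
  | [] => left; rfl
  | [c] => left; rfl
  | c :: d :: t =>
    by_cases h : c = a ∧ d = b
    · right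
      simp only [rep2, h]
      match new, hnew with
      | e :: _, hnew => simpa using hnew
    · left; simp [rep2, h]

-- the three replace passes, composed, equal B's single pass
theorem chain_eq_goB : ∀ (l : List Char),
    rep2 '\\' '"' ['"'] (rep2 '\\' '\'' ['\''] (rep2 '\\' 'n' [' '] l)) = goB l := by
  have main : ∀ (n : Nat) (l : List Char), l.length ≤ n →
      rep2 '\\' '"' ['"'] (rep2 '\\' '\'' ['\''] (rep2 '\\' 'n' [' '] l)) = goB l := by
    intro n
    induction n with
    | zero =>
      intro l h
      have : l = [] := List.eq_nil_of_length_eq_zero (Nat.le_zero.mp h)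
      subst this; simp [rep2, goB]
    | succ n ih =>
      intro l h
      match l with
      | [] => simp [rep2, goB]
      | [c] => simp [rep2, goB]
      | c :: d :: t =>
        have hlt : t.length ≤ n := by simp at h; omega
        have hdt : (d :: t).length ≤ n := by simp at h ⊢; omega
        by_cases hc : c = '\\'
        · subst hc
          by_cases hdn : d = 'n'
          · subst hdn
            have h1 : rep2 '\\' 'n' [' '] ('\\' :: 'n' :: t) = ' ' :: rep2 '\\' 'n' [' '] t := by
              simp [rep2]
            rw [h1, rep2_cons_ne_fst _ _ _ _ _ (by decide),
                rep2_cons_ne_fst _ _ _ _ _ (by decide), ih t hlt]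
            simp [goB]
          · by_cases hdq : d = '\''
            · subst hdq
              have h1 : rep2 '\\' 'n' [' '] ('\\' :: '\'' :: t)
                  = '\\' :: '\'' :: rep2 '\\' 'n' [' '] t := by
                rw [show ('\\' :: '\'' :: t) = '\\' :: ('\'' :: t) from rfl]
                rw [rep2_cons_ne_snd _ _ _ _ _ (by simp),
                    rep2_cons_ne_fst _ _ _ _ _ (by decide)]
              have h2 : rep2 '\\' '\'' ['\''] ('\\' :: '\'' :: rep2 '\\' 'n' [' '] t)
                  = '\'' :: rep2 '\\' '\'' ['\''] (rep2 '\\' 'n' [' '] t) := by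
                simp [rep2]
              rw [h1, h2, rep2_cons_ne_fst _ _ _ _ _ (by decide), ih t hlt]
              simp [goB]
            · by_cases hdd : d = '"'
              · subst hdd
                have h1 : rep2 '\\' 'n' [' '] ('\\' :: '"' :: t)
                    = '\\' :: '"' :: rep2 '\\' 'n' [' '] t := by
                  rw [show ('\\' :: '"' :: t) = '\\' :: ('"' :: t) from rfl]
                  rw [rep2_cons_ne_snd _ _ _ _ _ (by simp),
                      rep2_cons_ne_fst _ _ _ _ _ (by decide)]
                have h2 : rep2 '\\' '\'' ['\''] ('\\' :: '"' :: rep2 '\\' 'n' [' '] t)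
                    = '\\' :: '"' :: rep2 '\\' '\'' ['\''] (rep2 '\\' 'n' [' '] t) := by
                  rw [show ('\\' :: '"' :: rep2 '\\' 'n' [' '] t)
                        = '\\' :: ('"' :: rep2 '\\' 'n' [' '] t) from rfl]
                  rw [rep2_cons_ne_snd _ _ _ _ _ (by simp),
                      rep2_cons_ne_fst _ _ _ _ _ (by decide)]
                have h3 : rep2 '\\' '"' ['"']
                      ('\\' :: '"' :: rep2 '\\' '\'' ['\''] (rep2 '\\' 'n' [' '] t))
                    = '"' :: rep2 '\\' '"' ['"'] (rep2 '\\' '\'' ['\''] (rep2 '\\' 'n' [' '] t)) := by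
                  simp [rep2]
                rw [h1, h2, h3, ih t hlt]
                simp [goB]
              · -- backslash followed by a non-escape character: every pass copies it
                have h1 : rep2 '\\' 'n' [' '] ('\\' :: d :: t)
                    = '\\' :: rep2 '\\' 'n' [' '] (d :: t) := by
                  rw [show ('\\' :: d :: t) = '\\' :: (d :: t) from rfl]
                  exact rep2_cons_ne_snd _ _ _ _ _ (by simpa using hdn)
                have hhead1 : (rep2 '\\' 'n' [' '] (d :: t)).head? = some d ∨
                    (rep2 '\\' 'n' [' '] (d :: t)).head? = some ' ' := by
                  simpa using rep2_head? '\\' 'n' [' '] (d :: t) ' ' rfl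
                have h2 : rep2 '\\' '\'' ['\''] ('\\' :: rep2 '\\' 'n' [' '] (d :: t))
                    = '\\' :: rep2 '\\' '\'' ['\''] (rep2 '\\' 'n' [' '] (d :: t)) := by
                  apply rep2_cons_ne_snd
                  rcases hhead1 with h' | h' <;> rw [h']
                  · simpa using hdq
                  · decide
                have hhead2 : (rep2 '\\' '\'' ['\''] (rep2 '\\' 'n' [' '] (d :: t))).head?
                      = (rep2 '\\' 'n' [' '] (d :: t)).head? ∨
                    (rep2 '\\' '\'' ['\''] (rep2 '\\' 'n' [' '] (d :: t))).head? = some '\'' :=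
                  rep2_head? '\\' '\'' ['\''] _ '\'' rfl
                have h3 : rep2 '\\' '"' ['"']
                      ('\\' :: rep2 '\\' '\'' ['\''] (rep2 '\\' 'n' [' '] (d :: t)))
                    = '\\' :: rep2 '\\' '"' ['"']
                        (rep2 '\\' '\'' ['\''] (rep2 '\\' 'n' [' '] (d :: t))) := by
                  apply rep2_cons_ne_snd
                  rcases hhead2 with h' | h' <;> rw [h']
                  · rcases hhead1 with h'' | h'' <;> rw [h'']
                    · simpa using hdd
                    · decide
                  · decide
                rw [h1, h2, h3, ih (d :: t) hdt]
                have hgo : goB ('\\' :: d :: t) = '\\' :: goB (d :: t) := by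
                  simp [goB, hdn, hdq, hdd]
                rw [hgo]
        · -- ordinary character: every pass copies it
          rw [show (c :: d :: t) = c :: (d :: t) from rfl]
          rw [rep2_cons_ne_fst _ _ _ _ _ hc, rep2_cons_ne_fst _ _ _ _ _ hc,
              rep2_cons_ne_fst _ _ _ _ _ hc, ih (d :: t) hdt]
          simp [goB, hc]
  intro l; exact main l.length l le_rfl

-- ===== VERDICT (by name: the statement is the Claim_ definition above) =====
theorem remove_escaped_spec : Claim_equal_remove_escaped := by
  intro s _
  unfold Spec_remove_escaped remove_escaped remove_escaped_alt
  have key : ∀ l : List Char,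
      PySem.Chars.replace (PySem.Chars.replace (PySem.Chars.replace l
        ['\\', 'n'] [' ']) ['\\', '\''] ['\'']) ['\\', '"'] ['"'] = goB l := by
    intro l
    rw [replace_eq_rep2, replace_eq_rep2, replace_eq_rep2, chain_eq_goB]
  simp only [List.foldl]
  simp only [PySem.Str.replace, PySem.Str.strip, String.toList_ofList,
      show ("\\n" : String).toList = ['\\', 'n'] from rfl,
      show (" " : String).toList = [' '] from rfl,
      show ("\\'" : String).toList = ['\\', '\''] from rfl,
      show ("'" : String).toList = ['\''] from rfl,
      show ("\\\"" : String).toList = ['\\', '"'] from rfl,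
      show ("\"" : String).toList = ['"'] from rfl,
      key]
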